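-- pv_equiv track=rewrite | github.com/std-modelware/polytech-diskrete-2020 | Alexey Burkov/Lab2/main.py | check_axis
-- ===== SOURCE A (Python) =====
-- def check_axis(sequence, axis):
--     index1 = axis[0] // 2
--     index2 = index1 - 1
--     if axis[0] % 2:
--         index2 += 1
--     for i in range(len(sequence) // 2 + 1):
--         if sequence[(index1 + i) % len(sequence)] != sequence[(index2 - i) % len(sequence)]:
--             return False
--     return True
-- ===== SOURCE B (Python) =====
-- def check_axis(sequence, axis):
--     k = (axis[0] // 2) % len(sequence)
--     r = sequence[k:] + sequence[:k]
--     if axis[0] % 2: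
--         r = r[1:]
--     return r == r[::-1]
-- ===== Notes on version B (the rewrite author's own statement) =====
-- stated objective: idiomatic
-- what changed: Replaces the modular two-index walk (n//2+1 comparisons with index arithmetic per step) by rotating the sequence so the axis sits at the front and comparing the rotated list (minus its head when the axis is odd) with its reverse.
import Mathlib
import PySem

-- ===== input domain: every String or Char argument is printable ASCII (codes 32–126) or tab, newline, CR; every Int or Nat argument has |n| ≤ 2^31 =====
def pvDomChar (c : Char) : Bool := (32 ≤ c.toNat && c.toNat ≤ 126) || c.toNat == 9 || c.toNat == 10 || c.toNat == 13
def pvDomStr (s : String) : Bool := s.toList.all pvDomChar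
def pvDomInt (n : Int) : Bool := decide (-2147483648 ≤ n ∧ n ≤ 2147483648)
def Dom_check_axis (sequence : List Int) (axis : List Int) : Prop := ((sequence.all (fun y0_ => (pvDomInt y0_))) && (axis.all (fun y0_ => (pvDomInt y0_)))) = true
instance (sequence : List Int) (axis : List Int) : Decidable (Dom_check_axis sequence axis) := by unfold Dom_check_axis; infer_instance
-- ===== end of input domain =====

-- B rotates the sequence so the axis sits at the front and compares (a tail-slice of) the
-- rotation with its reverse, instead of A's modular two-index walk; objective: idiomatic.

-- ===== PORT A =====
def check_axis (sequence : List Int) (axis : List Int) : Bool :=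
  let index1 := PySem.Int.floordiv ((PySem.List.pyGet? axis 0).getD 0) 2
  let index2 := index1 - 1
  let index2 := if PySem.Int.mod ((PySem.List.pyGet? axis 0).getD 0) 2 ≠ 0 then index2 + 1 else index2
  let n : Int := sequence.length
  (PySem.List.pyRange 0 (PySem.Int.floordiv n 2 + 1) 1).all (fun i =>
    PySem.List.pyGetD sequence (PySem.Int.mod (index1 + i) n) 0
      == PySem.List.pyGetD sequence (PySem.Int.mod (index2 - i) n) 0)

-- ===== PORT B =====
def check_axis_alt (sequence : List Int) (axis : List Int) : Bool :=
  let k := PySem.Int.mod (PySem.Int.floordiv ((PySem.List.pyGet? axis 0).getD 0) 2) (sequence.length : Int)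
  let r := PySem.List.slice sequence (some k) none ++ PySem.List.slice sequence none (some k)
  let r2 := if PySem.Int.mod ((PySem.List.pyGet? axis 0).getD 0) 2 ≠ 0 then PySem.List.slice r (some 1) none else r
  r2 == (PySem.List.slice? r2 none none (-1)).getD []    -- r[::-1]

-- ===== PRECONDITION & SPEC =====
-- A raises IndexError on axis = [] and ZeroDivisionError on sequence = [] (B raises the same): excluded.
def Pre_check_axis (sequence : List Int) (axis : List Int) : Prop :=
  sequence ≠ [] ∧ axis ≠ []
instance (sequence : List Int) (axis : List Int) : Decidable (Pre_check_axis sequence axis) := by unfold Pre_check_axis; infer_instance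

def pvWitness_check_axis : List Int × List Int := ([1, 2, 2, 1], [4])

def Spec_check_axis (sequence : List Int) (axis : List Int) (out : Bool) : Prop := out = check_axis_alt sequence axis
instance (sequence : List Int) (axis : List Int) (out : Bool) : Decidable (Spec_check_axis sequence axis out) := by unfold Spec_check_axis; infer_instance

-- ===== CLAIM (what is proved, stated in full; the proofs are below) =====
def Claim_equal_check_axis : Prop := ∀ (sequence : List Int) (axis : List Int), Dom_check_axis sequence axis → Pre_check_axis sequence axis → Spec_check_axis sequence axis (check_axis sequence axis)

-- ===== LEMMAS AND PROOFS =====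

-- the sequence value at modular position t (both programs only read such positions)
def pvAt (s : List Int) (t : ℤ) : Int :=
  PySem.List.pyGetD s (PySem.Int.mod t (s.length : ℤ)) 0

theorem pvAt_congr (s : List Int) (hn : 0 < (s.length : ℤ)) {a b : ℤ}
    (h : a % (s.length : ℤ) = b % (s.length : ℤ)) : pvAt s a = pvAt s b := by
  unfold pvAt
  rw [PySem.Int.mod_eq_emod_of_pos hn, PySem.Int.mod_eq_emod_of_pos hn, h]

theorem pvAt_getElem? (s : List Int) (hn : 0 < (s.length : ℤ)) (t : ℤ) :
    s[((t % (s.length : ℤ)).toNat)]? = some (pvAt s t) := by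
  have h0 : 0 ≤ t % (s.length : ℤ) := Int.emod_nonneg t (by omega)
  have h1 : t % (s.length : ℤ) < (s.length : ℤ) := Int.emod_lt_of_pos t hn
  rw [List.getElem?_eq_getElem (show (t % (s.length : ℤ)).toNat < s.length by omega)]
  unfold pvAt
  rw [PySem.Int.mod_eq_emod_of_pos hn, PySem.List.pyGetD_eq_getElem s 0 h0 h1]

theorem pal_iff (l : List Int) :
    ((l == l.reverse) = true) ↔ ∀ j, j < l.length → l[j]? = l[l.length - 1 - j]? := by
  rw [beq_iff_eq]
  constructor
  · intro h j hj
    conv_lhs => rw [h]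
    exact List.getElem?_reverse hj
  · intro h
    refine List.ext_getElem? (fun i => ?_)
    by_cases hi : i < l.length
    · rw [List.getElem?_reverse hi]
      exact h i hi
    · rw [List.getElem?_eq_none (by omega), List.getElem?_eq_none (by simp; omega)]

theorem rot_getElem? (s : List Int) (hn : 0 < (s.length : ℤ)) (c : ℤ) (k : ℕ)
    (hkc : (k : ℤ) = PySem.Int.mod c (s.length : ℤ)) (j : ℕ) (hj : j < s.length) :
    (s.drop k ++ s.take k)[j]? = some (pvAt s (c + j)) := by
  have h0 := PySem.Int.mod_nonneg c hn
  have h1 := PySem.Int.mod_lt c hn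
  have hk_le : k ≤ s.length := by omega
  rw [← List.rotate_eq_drop_append_take hk_le, List.getElem?_rotate hj]
  have e1 : (((j + k) % s.length : ℕ) : ℤ) = ((j : ℤ) + (k : ℤ)) % (s.length : ℤ) := by
    push_cast
    ring_nf
  have e2 : ((j : ℤ) + (k : ℤ)) % (s.length : ℤ) = (c + j) % (s.length : ℤ) := by
    rw [hkc, PySem.Int.mod_eq_emod_of_pos hn, add_comm ((j : ℤ)) _, Int.emod_add_emod]
  have e3 : 0 ≤ (c + (j : ℤ)) % (s.length : ℤ) := Int.emod_nonneg _ (by omega)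
  have hidx : (j + k) % s.length = ((c + (j : ℤ)) % (s.length : ℤ)).toNat := by omega
  rw [hidx]
  exact pvAt_getElem? s hn (c + j)

theorem B_even_iff (s : List Int) (hn : 0 < (s.length : ℤ)) (c : ℤ) (k : ℕ)
    (hkc : (k : ℤ) = PySem.Int.mod c (s.length : ℤ)) :
    (((s.drop k ++ s.take k) == (s.drop k ++ s.take k).reverse) = true)
      ↔ ∀ j : ℤ, 0 ≤ j → j < (s.length : ℤ) → pvAt s (c + j) = pvAt s (c - 1 - j) := by
  have h0 := PySem.Int.mod_nonneg c hn
  have h1 := PySem.Int.mod_lt c hn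
  have hk_le : k ≤ s.length := by omega
  have hlen : (s.drop k ++ s.take k).length = s.length := by
    simp [List.length_append]
    omega
  rw [pal_iff, hlen]
  constructor
  · intro h j hj0 hjn
    have hjt : j.toNat < s.length := by omega
    have hh := h j.toNat hjt
    rw [rot_getElem? s hn c k hkc j.toNat hjt,
        rot_getElem? s hn c k hkc (s.length - 1 - j.toNat) (by omega)] at hh
    have e1 : ((j.toNat : ℕ) : ℤ) = j := by omega
    have e2 : pvAt s (c + ((s.length - 1 - j.toNat : ℕ) : ℤ)) = pvAt s (c - 1 - j) :=
      pvAt_congr s hn (by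
        rw [show c + ((s.length - 1 - j.toNat : ℕ) : ℤ) = (c - 1 - j) + (s.length : ℤ) * 1 from by omega]
        exact Int.add_mul_emod_self_left _ _ _)
    rw [e1, e2] at hh
    exact Option.some.inj hh
  · intro h m hm
    rw [rot_getElem? s hn c k hkc m hm,
        rot_getElem? s hn c k hkc (s.length - 1 - m) (by omega)]
    have hv := h (m : ℤ) (by omega) (by omega)
    congr 1
    rw [hv]
    exact (pvAt_congr s hn (by
      rw [show c + ((s.length - 1 - m : ℕ) : ℤ) = (c - 1 - (m : ℤ)) + (s.length : ℤ) * 1 from by omega]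
      exact Int.add_mul_emod_self_left _ _ _)).symm

theorem B_odd_iff (s : List Int) (hn : 0 < (s.length : ℤ)) (c : ℤ) (k : ℕ)
    (hkc : (k : ℤ) = PySem.Int.mod c (s.length : ℤ)) :
    (((s.drop k ++ s.take k).tail == (s.drop k ++ s.take k).tail.reverse) = true)
      ↔ ∀ j : ℤ, 0 ≤ j → j < (s.length : ℤ) → pvAt s (c + j) = pvAt s (c - j) := by
  have h0 := PySem.Int.mod_nonneg c hn
  have h1 := PySem.Int.mod_lt c hn
  have hk_le : k ≤ s.length := by omega
  have hlen : (s.drop k ++ s.take k).length = s.length := by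
    simp [List.length_append]
    omega
  have hlt : (s.drop k ++ s.take k).tail.length = s.length - 1 := by
    rw [List.length_tail, hlen]
  rw [pal_iff, hlt, ← List.drop_one]
  constructor
  · intro h j hj0 hjn
    by_cases hj : j = 0
    · subst hj
      exact pvAt_congr s hn (by norm_num)
    · have hm : j.toNat - 1 < s.length - 1 := by omega
      have hh := h (j.toNat - 1) hm
      rw [List.getElem?_drop, List.getElem?_drop,
          show (1 + (j.toNat - 1)) = j.toNat from by omega,
          show (1 + (s.length - 1 - 1 - (j.toNat - 1))) = s.length - j.toNat from by omega,
          rot_getElem? s hn c k hkc j.toNat (by omega),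
          rot_getElem? s hn c k hkc (s.length - j.toNat) (by omega)] at hh
      have e1 : ((j.toNat : ℕ) : ℤ) = j := by omega
      have e2 : pvAt s (c + ((s.length - j.toNat : ℕ) : ℤ)) = pvAt s (c - j) :=
        pvAt_congr s hn (by
          rw [show c + ((s.length - j.toNat : ℕ) : ℤ) = (c - j) + (s.length : ℤ) * 1 from by omega]
          exact Int.add_mul_emod_self_left _ _ _)
      rw [e1, e2] at hh
      exact Option.some.inj hh
  · intro h m hm
    rw [List.getElem?_drop, List.getElem?_drop,
        show (1 + m) = m + 1 from by omega,
        show (1 + (s.length - 1 - 1 - m)) = s.length - (m + 1) from by omega,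
        rot_getElem? s hn c k hkc (m + 1) (by omega),
        rot_getElem? s hn c k hkc (s.length - (m + 1)) (by omega)]
    have hv := h ((m + 1 : ℕ) : ℤ) (by omega) (by omega)
    congr 1
    rw [hv]
    exact (pvAt_congr s hn (by
      rw [show c + ((s.length - (m + 1) : ℕ) : ℤ) = (c - ((m + 1 : ℕ) : ℤ)) + (s.length : ℤ) * 1 from by omega]
      exact Int.add_mul_emod_self_left _ _ _)).symm

theorem checkA_iff (s : List Int) (i1 i2 : ℤ) :
    ((PySem.List.pyRange 0 (PySem.Int.floordiv (s.length : ℤ) 2 + 1) 1).all (fun i =>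
        PySem.List.pyGetD s (PySem.Int.mod (i1 + i) (s.length : ℤ)) 0
          == PySem.List.pyGetD s (PySem.Int.mod (i2 - i) (s.length : ℤ)) 0) = true)
      ↔ ∀ i : ℤ, 0 ≤ i → i ≤ (s.length : ℤ) / 2 → pvAt s (i1 + i) = pvAt s (i2 - i) := by
  rw [List.all_eq_true]
  constructor
  · intro h i h0 h1
    have := h i (by
      rw [PySem.List.mem_pyRange_one]
      refine ⟨h0, ?_⟩
      rw [PySem.Int.floordiv_eq_ediv_of_pos (by norm_num)]
      omega)
    simpa [pvAt, beq_iff_eq] using this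
  · intro h i hi
    rw [PySem.List.mem_pyRange_one] at hi
    have h2 : i ≤ (s.length : ℤ) / 2 := by
      have := hi.2
      rw [PySem.Int.floordiv_eq_ediv_of_pos (by norm_num)] at this
      omega
    simpa [pvAt, beq_iff_eq] using h i hi.1 h2

theorem core_iff (s : List Int) (hn : 0 < (s.length : ℤ)) (i1 i2 : ℤ)
    (hd : i2 = i1 - 1 ∨ i2 = i1) :
    (∀ i : ℤ, 0 ≤ i → i ≤ (s.length : ℤ) / 2 → pvAt s (i1 + i) = pvAt s (i2 - i))
      ↔ ∀ j : ℤ, 0 ≤ j → j < (s.length : ℤ) → pvAt s (i1 + j) = pvAt s (i2 - j) := by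
  have hb : i1 - 1 ≤ i2 ∧ i2 ≤ i1 := by rcases hd with h | h <;> omega
  constructor
  · intro h j h0 hjn
    by_cases hc : j ≤ (s.length : ℤ) / 2
    · exact h j h0 hc
    · have heq := h (i2 - i1 + (s.length : ℤ) - j) (by omega) (by omega)
      have e1 : pvAt s (i1 + (i2 - i1 + (s.length : ℤ) - j)) = pvAt s (i2 - j) :=
        pvAt_congr s hn (by
          rw [show i1 + (i2 - i1 + (s.length : ℤ) - j) = (i2 - j) + (s.length : ℤ) * 1 from by ring]
          exact Int.add_mul_emod_self_left _ _ _)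
      have e2 : pvAt s (i2 - (i2 - i1 + (s.length : ℤ) - j)) = pvAt s (i1 + j) :=
        pvAt_congr s hn (by
          rw [show i2 - (i2 - i1 + (s.length : ℤ) - j) = (i1 + j) + (s.length : ℤ) * (-1) from by ring]
          exact Int.add_mul_emod_self_left _ _ _)
      rw [e1, e2] at heq
      exact heq.symm
  · intro h i h0 hi
    exact h i h0 (by omega)

-- ===== VERDICT (by name: the statement is the Claim_ definition above) =====
theorem check_axis_spec : Claim_equal_check_axis := by
  intro s axis _ hpre
  obtain ⟨hs, ha⟩ := hpre
  unfold Spec_check_axis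
  have hlp : 0 < s.length := List.length_pos_iff.mpr hs
  have hn : 0 < (s.length : ℤ) := by omega
  simp only [check_axis, check_axis_alt]
  set a0 := (PySem.List.pyGet? axis 0).getD 0 with ha0
  set c := PySem.Int.floordiv a0 2 with hc
  have hk0 : (0 : ℤ) ≤ PySem.Int.mod c (s.length : ℤ) := PySem.Int.mod_nonneg c hn
  have hkc : (((PySem.Int.mod c (s.length : ℤ)).toNat : ℕ) : ℤ) = PySem.Int.mod c (s.length : ℤ) :=
    Int.toNat_of_nonneg hk0
  rcases PySem.Int.mod_two_eq a0 with hpar | hpar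
  · -- even axis coordinate
    have hne0 : ¬(PySem.Int.mod a0 2 ≠ 0) := fun h => h hpar
    simp only [if_neg hne0]
    rw [PySem.List.slice?_none_none_neg_one, Option.getD_some,
        PySem.List.slice_from s hk0, PySem.List.slice_to s hk0]
    rw [Bool.eq_iff_iff, checkA_iff s c (c - 1), core_iff s hn c (c - 1) (Or.inl rfl)]
    exact (B_even_iff s hn c _ hkc).symm
  · -- odd axis coordinate
    have hne : PySem.Int.mod a0 2 ≠ 0 := by rw [hpar]; norm_num
    simp only [if_pos hne]
    rw [show c - 1 + 1 = c from by ring]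
    rw [PySem.List.slice?_none_none_neg_one, Option.getD_some, PySem.List.slice_from_one,
        PySem.List.slice_from s hk0, PySem.List.slice_to s hk0]
    rw [Bool.eq_iff_iff, checkA_iff s c c, core_iff s hn c c (Or.inr rfl)]
    exact (B_odd_iff s hn c _ hkc).symm
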